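-- pv_equiv track=rewrite | github.com/Theorize/goneHacking | main_app/views.py | text_parser
-- ===== SOURCE A (Python) =====
-- def parse_text(text_string):
--     """Function docs string"""
--     user_dict = {}
--     punctuation = ['.', ',', '!', '?', ':', ';']
--     for punct in punctuation:
--         text_string = text_string.replace(punct, ' ')
--     string_list = text_string.split(' ')
--     bigram_list = get_n_grams(string_list, 2)
--     merged_list = string_list + bigram_list
--     for s in merged_list:
--         user_dict[s.lower()] = ''
--
--     return user_dict
--
-- def get_n_grams(words, n):
--     """Build an ngram"""
--     n_grams = []
--     for i in range(0, len(words)-n+1):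
--         n_grams.append(' '.join(words[i:(i+n)]))
--     return n_grams
--
-- def text_parser(text):
--
--     small_dictionary = parse_text(str(text))
--
--     big_dictionary = {'chemotherapy': ('https://www.cancer.dk/hjaelp-viden/kraeftbehandling/behandlingsformer/kemoterapi/', ['Transportation', 'Childcare', 'Social']),
--                       'lung cancer': ('http://www-dep.iarc.fr/NORDCAN/english/StatsFact.asp?cancer=180&country=208', ['Social', 'Donation']),
--                       'treatment': ('https://www.cancer.dk/hjaelp-viden/kraeftbehandling/',
--                                     ['Social', 'Transportation', 'Childcare']),
--                       'home': ('http://www.example.com', ['Household']),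
--                       'family': ('http://www.example.com',['Childcare', 'Household']),
--                       'donate': ('https://www.cancer.dk/stoet-os/',
--                                  ['Donation']),
--                       'breast cancer': ('http://www-dep.iarc.fr/NORDCAN/english/StatsFact.asp?cancer=200&country=208',
--                                         ['Social', 'Donation']),
--                       'immunotherapy': ('https://www.cancer.dk/hjaelp-viden/kraeftbehandling/behandlingsformer/immunterapi/',
--                                         ['Transportation', 'Childcare', 'Social']),
--                       'radiotherapy': ('https://www.cancer.dk/hjaelp-viden/kraeftbehandling/behandlingsformer/straalebehandling/',
--                                        ['Transportation', 'Childcare', 'Social']),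
--                       'kids': ('http://www.example.com', ['Childcare']),
--                       'dog': ('http://www.example.com', ['Petcare']),
--                       'cat': ('http://www.example.com', ['Petcare']),
--                       'screening': ('https://www.cancer.dk/hjaelp-viden/undersoegelser-for-kraeft/', ['Social', 'Transportation'])}
--
--     final_dict = {'hits': {}}
--     cats = {'category': set()}
--     for key in small_dictionary:
--         if key in big_dictionary:
--             final_dict['hits'][key] = big_dictionary[key][0]
--             cats['category'].update(big_dictionary[key][1])
--
--     return final_dict, cats
-- ===== SOURCE B (Python) =====
-- BIG_DICTIONARY = {'chemotherapy': ('https://www.cancer.dk/hjaelp-viden/kraeftbehandling/behandlingsformer/kemoterapi/', ['Transportation', 'Childcare', 'Social']),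
--                   'lung cancer': ('http://www-dep.iarc.fr/NORDCAN/english/StatsFact.asp?cancer=180&country=208', ['Social', 'Donation']),
--                   'treatment': ('https://www.cancer.dk/hjaelp-viden/kraeftbehandling/', ['Social', 'Transportation', 'Childcare']),
--                   'home': ('http://www.example.com', ['Household']),
--                   'family': ('http://www.example.com', ['Childcare', 'Household']),
--                   'donate': ('https://www.cancer.dk/stoet-os/', ['Donation']),
--                   'breast cancer': ('http://www-dep.iarc.fr/NORDCAN/english/StatsFact.asp?cancer=200&country=208', ['Social', 'Donation']),
--                   'immunotherapy': ('https://www.cancer.dk/hjaelp-viden/kraeftbehandling/behandlingsformer/immunterapi/', ['Transportation', 'Childcare', 'Social']),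
--                   'radiotherapy': ('https://www.cancer.dk/hjaelp-viden/kraeftbehandling/behandlingsformer/straalebehandling/', ['Transportation', 'Childcare', 'Social']),
--                   'kids': ('http://www.example.com', ['Childcare']),
--                   'dog': ('http://www.example.com', ['Petcare']),
--                   'cat': ('http://www.example.com', ['Petcare']),
--                   'screening': ('https://www.cancer.dk/hjaelp-viden/undersoegelser-for-kraeft/', ['Social', 'Transportation'])}
--
--
-- def _match(hits, cats, key):
--     info = BIG_DICTIONARY.get(key)
--     if info is not None:
--         hits[key] = info[0]
--         cats.update(info[1])
--
--
-- def text_parser(text):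
--     # Single-pass character-level scanner: lowercase the text once, walk its
--     # characters with a current-token buffer; every delimiter (space or one of
--     # the six punctuation marks) ends the token, which is matched immediately
--     # (unigram phase), while the bigram of the previous and current token is
--     # deferred to a second short pass so bigram hits follow all unigram hits.
--     hits = {}
--     cats = set()
--     bigrams = []
--     prev = None
--     cur = []
--     for c in str(text).lower():
--         if c in ' .,!?:;':
--             tok = ''.join(cur)
--             _match(hits, cats, tok)
--             if prev is not None:
--                 bigrams.append(prev + ' ' + tok)
--             prev = tok
--             cur = []
--         else:
--             cur.append(c)
--     tok = ''.join(cur)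
--     _match(hits, cats, tok)
--     if prev is not None:
--         bigrams.append(prev + ' ' + tok)
--     for bg in bigrams:
--         _match(hits, cats, bg)
--     return {'hits': hits}, {'category': cats}
-- ===== Notes on version B (the rewrite author's own statement) =====
-- stated objective: alternative
-- what changed: A stages six .replace passes, a space-split, an indexed n-gram loop, a dedup token dict and then a membership loop over that dict; B is a single-pass character-level state machine over the lowercased text (current-token buffer, previous token) that matches each unigram the moment its token closes and defers the collected bigrams to one short second pass, with no replace/split/slicing and no intermediate token dict.
import Mathlib
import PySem

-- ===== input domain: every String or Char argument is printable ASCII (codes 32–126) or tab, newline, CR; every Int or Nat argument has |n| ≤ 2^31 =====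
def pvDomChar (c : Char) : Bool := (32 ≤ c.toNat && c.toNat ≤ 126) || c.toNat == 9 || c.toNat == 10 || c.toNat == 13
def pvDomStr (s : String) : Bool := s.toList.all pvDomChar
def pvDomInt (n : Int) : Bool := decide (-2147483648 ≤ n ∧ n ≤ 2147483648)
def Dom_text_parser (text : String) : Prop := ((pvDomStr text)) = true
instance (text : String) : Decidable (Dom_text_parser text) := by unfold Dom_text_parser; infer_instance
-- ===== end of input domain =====

-- B replaces A's staged replace/split/n-gram/token-dict passes by a single character-level
-- scan of the lowercased text that matches unigrams as their tokens close and defers the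
-- collected bigrams to one short second pass; objective: alternative, same cost.


-- ===== PORT A =====
def pvBig : PySem.Dict String (String × List String) := PySem.Dict.ofList
  [("chemotherapy", ("https://www.cancer.dk/hjaelp-viden/kraeftbehandling/behandlingsformer/kemoterapi/", ["Transportation", "Childcare", "Social"])),
   ("lung cancer", ("http://www-dep.iarc.fr/NORDCAN/english/StatsFact.asp?cancer=180&country=208", ["Social", "Donation"])),
   ("treatment", ("https://www.cancer.dk/hjaelp-viden/kraeftbehandling/", ["Social", "Transportation", "Childcare"])),
   ("home", ("http://www.example.com", ["Household"])),
   ("family", ("http://www.example.com", ["Childcare", "Household"])),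
   ("donate", ("https://www.cancer.dk/stoet-os/", ["Donation"])),
   ("breast cancer", ("http://www-dep.iarc.fr/NORDCAN/english/StatsFact.asp?cancer=200&country=208", ["Social", "Donation"])),
   ("immunotherapy", ("https://www.cancer.dk/hjaelp-viden/kraeftbehandling/behandlingsformer/immunterapi/", ["Transportation", "Childcare", "Social"])),
   ("radiotherapy", ("https://www.cancer.dk/hjaelp-viden/kraeftbehandling/behandlingsformer/straalebehandling/", ["Transportation", "Childcare", "Social"])),
   ("kids", ("http://www.example.com", ["Childcare"])),
   ("dog", ("http://www.example.com", ["Petcare"])),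
   ("cat", ("http://www.example.com", ["Petcare"])),
   ("screening", ("https://www.cancer.dk/hjaelp-viden/undersoegelser-for-kraeft/", ["Social", "Transportation"]))]

-- get_n_grams(words, n)
def pvGetNGrams (words : List String) (n : Int) : List String :=
  (PySem.List.pyRange 0 (PySem.List.len words - n + 1) 1).foldl
    (fun acc i => acc ++ [PySem.Str.join " " (PySem.List.slice words (some i) (some (i + n)))]) []

-- parse_text(text_string)
def pvParseText (textString : String) : PySem.Dict String String :=
  let ts := [".", ",", "!", "?", ":", ";"].foldl (fun t p => PySem.Str.replace t p " ") textString
  let stringList := (PySem.Str.split? ts " ").getD []   -- sep " " ≠ "": split? is always some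
  let bigramList := pvGetNGrams stringList 2
  let mergedList := stringList ++ bigramList
  mergedList.foldl (fun d s => d.insert (PySem.Str.lower s) "") PySem.Dict.empty

def pvStepA (s : PySem.Dict String String × PySem.Set String) (key : String) :
    PySem.Dict String String × PySem.Set String :=
  if pvBig.contains key then
    (s.1.insert key (pvBig.getD key ("", [])).1, PySem.Set.update s.2 (pvBig.getD key ("", [])).2)
  else s

def text_parser (text : String) : (List (String × List (String × String))) × (List (String × List String)) :=
  let small := pvParseText text                 -- str(text) = text for a str argument
  let res := small.keys.foldl pvStepA (PySem.Dict.empty, PySem.Set.empty)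
  ([("hits", res.1.items)], [("category", res.2)])

-- ===== PORT B =====
-- _match(hits, cats, key)
def pvMatch (ms : PySem.Dict String String × PySem.Set String) (key : String) :
    PySem.Dict String String × PySem.Set String :=
  match pvBig.get? key with
  | some info => (ms.1.insert key info.1, PySem.Set.update ms.2 info.2)
  | none => ms

-- the delimiter branch's body: close the token, match it, queue the bigram, remember it
def pvHandle (st : (PySem.Dict String String × PySem.Set String) × List String × Option String)
    (tok : String) : (PySem.Dict String String × PySem.Set String) × List String × Option String :=
  (pvMatch st.1 tok,
   (match st.2.2 with
    | some p => st.2.1 ++ [p ++ " " ++ tok]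
    | none => st.2.1),
   some tok)

-- one character of the scan loop; state = ((hits/cats, bigrams, prev), cur)
def pvScanStep (st : ((PySem.Dict String String × PySem.Set String) × List String × Option String) × List Char)
    (c : Char) : ((PySem.Dict String String × PySem.Set String) × List String × Option String) × List Char :=
  if (" .,!?:;").toList.contains c then (pvHandle st.1 (String.ofList st.2), ([] : List Char))
  else (st.1, st.2 ++ [c])

def text_parser_alt (text : String) : (List (String × List (String × String))) × (List (String × List String)) :=
  let st := (PySem.Str.lower text).toList.foldl pvScanStep
              (((PySem.Dict.empty, PySem.Set.empty), [], none), [])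
  let fin := pvHandle st.1 (String.ofList st.2)        -- flush the last token
  let ms := fin.2.1.foldl pvMatch fin.1                -- second pass: the queued bigrams
  ([("hits", ms.1.items)], [("category", ms.2)])

-- ===== PRECONDITION & SPEC =====
def Spec_text_parser (text : String) (out : (List (String × List (String × String))) × (List (String × List String))) : Prop := out = text_parser_alt text
instance (text : String) (out : (List (String × List (String × String))) × (List (String × List String))) : Decidable (Spec_text_parser text out) := by unfold Spec_text_parser; infer_instance

-- ===== CLAIM (what is proved, stated in full; the proofs are below) =====
def Claim_equal_text_parser : Prop := ∀ (text : String), Dom_text_parser text → Spec_text_parser text (text_parser text)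

-- ===== LEMMAS AND PROOFS =====

-- (1) CLEANING: each single-char replace is a map over the characters
lemma pv_go_single (c : Char) : ∀ (fuel : Nat) (l acc : List Char), l.length ≤ fuel →
    PySem.Chars.replace.go [c] [' '] fuel l acc
      = acc.reverse ++ l.map (fun ch => if ch = c then ' ' else ch) := by
  intro fuel
  induction fuel with
  | zero => intro l acc h; simp at h; simp [h, PySem.Chars.replace.go]
  | succ n ih =>
    intro l acc h
    cases l with
    | nil => simp [PySem.Chars.replace.go]
    | cons x t =>
      have ht : t.length ≤ n := by simpa using h
      simp only [PySem.Chars.replace.go, List.isPrefixOf, Bool.and_true]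
      by_cases hx : c = x
      · subst hx
        simp only [beq_self_eq_true, if_pos, List.length_cons, List.length_nil, List.drop_succ_cons,
          List.drop_zero]
        rw [ih t ([' '].reverse ++ acc) (by simpa using ht)]
        simp
      · have hbx : (c == x) = false := by simp [hx]
        simp only [hbx, Bool.false_eq_true, if_false, List.map_cons]
        rw [ih t (x :: acc) ht]
        simp [Ne.symm hx]

lemma pv_replace_single (c : Char) (l : List Char) :
    PySem.Chars.replace l [c] [' '] = l.map (fun ch => if ch = c then ' ' else ch) := by
  rw [PySem.Chars.replace]
  simp [pv_go_single c l.length l [] (le_refl _)]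

-- six successive replaces = one char-map pass
lemma pv_clean_eq (t : String) :
    [".", ",", "!", "?", ":", ";"].foldl (fun s p => PySem.Str.replace s p " ") t
      = String.ofList (t.toList.map (fun c => if ".,!?:;".toList.contains c then ' ' else c)) := by
  apply String.toList_inj.mp
  simp only [List.foldl_cons, List.foldl_nil, PySem.Str.toList_replace]
  simp only [show (".":String).toList = ['.'] from by decide,
    show (",":String).toList = [','] from by decide,
    show ("!":String).toList = ['!'] from by decide,
    show ("?":String).toList = ['?'] from by decide,
    show (":":String).toList = [':'] from by decide,
    show (";":String).toList = [';'] from by decide,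
    show (" ":String).toList = [' '] from by decide,
    pv_replace_single, List.map_map]
  rw [show (String.ofList (t.toList.map (fun c => if ".,!?:;".toList.contains c then ' ' else c))).toList
        = t.toList.map (fun c => if ".,!?:;".toList.contains c then ' ' else c) from by simp]
  apply List.map_congr_left
  intro c _
  simp only [Function.comp]
  by_cases h1 : c = '.' ; · subst h1; decide
  by_cases h2 : c = ',' ; · subst h2; decide
  by_cases h3 : c = '!' ; · subst h3; decide
  by_cases h4 : c = '?' ; · subst h4; decide
  by_cases h5 : c = ':' ; · subst h5; decide
  by_cases h6 : c = ';' ; · subst h6; decide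
  simp [h1, h2, h3, h4, h5, h6]

-- (2) BIGRAMS: A's index loop = the zip of adjacent words
lemma pv_window_eq : ∀ (ws : List String),
    (List.range (ws.length - 1)).map (fun k => PySem.Str.join " " ((ws.drop k).take 2))
      = (ws.zip ws.tail).map (fun p => PySem.Str.join " " [p.1, p.2]) := by
  intro ws
  induction ws with
  | nil => simp
  | cons a rest ih =>
    cases rest with
    | nil => simp
    | cons b t =>
      simp only [List.length_cons, Nat.add_sub_cancel, List.range_succ_eq_map, List.map_cons,
        List.map_map, List.tail_cons, List.zip_cons_cons, List.drop_zero, List.take_succ_cons]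
      refine List.cons_eq_cons.mpr ⟨by simp, ?_⟩
      simp only [List.length_cons, Nat.add_sub_cancel, List.tail_cons] at ih
      rw [← ih]
      apply List.map_congr_left
      intro k _
      simp [List.drop_succ_cons]

lemma pv_ngrams_eq (ws : List String) :
    pvGetNGrams ws 2 = (ws.zip ws.tail).map (fun p => PySem.Str.join " " [p.1, p.2]) := by
  rw [← pv_window_eq, pvGetNGrams, PySem.List.foldl_append_singleton_eq_map, PySem.List.pyRange_one]
  simp only [List.map_map, PySem.List.len_eq, Int.sub_zero]
  have hn : ((ws.length : Int) - 2 + 1).toNat = ws.length - 1 := by omega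
  rw [hn]
  apply List.map_congr_left
  intro k hk
  simp only [Function.comp, Int.zero_add]
  rw [show ((k:Int) + 2) = ((k:Int) + ((2:Nat):Int)) from by norm_num,
    PySem.List.slice_natCast_add]

-- (3) the two match-step functions agree
lemma pv_match_some (s : PySem.Dict String String × PySem.Set String) (k : String)
    (info : String × List String) (h : pvBig.get? k = some info) :
    pvMatch s k = (s.1.insert k info.1, PySem.Set.update s.2 info.2) := by
  rw [pvMatch, h]

lemma pv_match_none (s : PySem.Dict String String × PySem.Set String) (k : String)
    (h : pvBig.get? k = none) : pvMatch s k = s := by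
  rw [pvMatch, h]

lemma pv_step_eq : pvStepA = pvMatch := by
  funext s k
  rw [pvStepA]
  cases h : pvBig.get? k with
  | none =>
    rw [pv_match_none s k h, if_neg]
    rw [PySem.Dict.contains_eq_isSome_get?, h]
    simp
  | some info =>
    rw [pv_match_some s k info h,
      if_pos (by rw [PySem.Dict.contains_eq_isSome_get?, h]; rfl)]
    rw [PySem.Dict.getD_eq_get?_getD, h]
    rfl

-- (4) folding pvMatch over the deduplicated token list = folding it over all tokens
def pvInv (s : PySem.Dict String String × PySem.Set String) (seen : List String) : Prop :=
  s.1.keys.Nodup ∧ ∀ k ∈ seen, ∀ info, pvBig.get? k = some info →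
    s.1.get? k = some info.1 ∧ ∀ c ∈ info.2, c ∈ s.2

lemma pv_insert_eq_self (d : PySem.Dict String String) (k : String) (v : String)
    (hnd : d.keys.Nodup) (h : d.get? k = some v) : d.insert k v = d := by
  apply PySem.Dict.ext
  rw [PySem.Dict.items_insert_of_contains d v (by rw [PySem.Dict.contains_eq_isSome_get?, h]; rfl)]
  have hmap : ∀ p ∈ d.items, (if (p.1 == k) = true then (k, v) else p) = p := by
    intro p hp
    by_cases hpk : (p.1 == k) = true
    · have hk : p.1 = k := by simpa using hpk
      have hv := PySem.Dict.get?_of_mem_items d (k := p.1) (v := p.2) (by simpa using hp) hnd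
      rw [hk, h] at hv
      cases hv
      simp [← hk]
    · simp [hpk]
  conv_rhs => rw [← List.map_id d.items]
  exact List.map_congr_left (by simpa using hmap)

lemma pv_update_eq_self (s : PySem.Set String) (cs : List String) (h : ∀ c ∈ cs, c ∈ s) :
    PySem.Set.update s cs = s := by
  rw [PySem.Set.update_eq_append_filter]
  have : List.filter (fun y => !s.contains y) (PySem.Set.ofList cs) = [] := by
    apply List.filter_eq_nil_iff.mpr
    intro a ha
    simp only [PySem.Set.contains_eq_listContains, Bool.not_eq_eq_eq_not, Bool.not_true,
      List.contains_eq_mem, decide_eq_false_iff_not, Decidable.not_not]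
    exact h a ((PySem.Set.mem_ofList cs a).mp ha)
  rw [this, List.append_nil]

lemma pv_step_noop (s : PySem.Dict String String × PySem.Set String) (seen : List String)
    (hs : pvInv s seen) (k : String) (hk : k ∈ seen) : pvMatch s k = s := by
  cases h : pvBig.get? k with
  | none => exact pv_match_none s k h
  | some info =>
    obtain ⟨hget, hcs⟩ := hs.2 k hk info h
    rw [pv_match_some s k info h, pv_insert_eq_self _ _ _ hs.1 hget, pv_update_eq_self _ _ hcs]

lemma pv_inv_step (s : PySem.Dict String String × PySem.Set String) (seen : List String)
    (hs : pvInv s seen) (k : String) : pvInv (pvMatch s k) (seen ++ [k]) := by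
  cases h : pvBig.get? k with
  | none =>
    rw [pv_match_none s k h]
    refine ⟨hs.1, ?_⟩
    intro k' hk' info hinfo
    rcases List.mem_append.mp hk' with h1 | h1
    · exact hs.2 k' h1 info hinfo
    · simp at h1; subst h1; rw [h] at hinfo; cases hinfo
  | some info =>
    rw [pv_match_some s k info h]
    refine ⟨PySem.Dict.nodup_keys_insert _ _ _ hs.1, ?_⟩
    intro k' hk' info' hinfo
    rcases List.mem_append.mp hk' with h1 | h1
    · obtain ⟨hget, hcs⟩ := hs.2 k' h1 info' hinfo
      constructor
      · rw [PySem.Dict.get?_insert]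
        split
        · next he => subst he; rw [h] at hinfo; cases hinfo; rfl
        · exact hget
      · intro c hc
        exact (PySem.Set.mem_update _ _ _).mpr (Or.inl (hcs c hc))
    · simp at h1; subst h1
      rw [h] at hinfo; cases hinfo
      exact ⟨PySem.Dict.get?_insert_self _ _ _,
        fun c hc => (PySem.Set.mem_update _ _ _).mpr (Or.inr hc)⟩

lemma pv_fold_dedup : ∀ (L : List String) (seen : List String)
    (s : PySem.Dict String String × PySem.Set String), pvInv s seen →
    ((PySem.Set.update seen L).drop seen.length).foldl pvMatch s = L.foldl pvMatch s := by
  intro L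
  induction L with
  | nil => intro seen s _; simp [PySem.Set.update]
  | cons k L ih =>
    intro seen s hs
    rw [PySem.Set.update_cons, List.foldl_cons]
    by_cases hk : k ∈ seen
    · rw [PySem.Set.add_of_mem hk, ih seen s hs, pv_step_noop s seen hs k hk]
    · rw [PySem.Set.add_of_not_mem hk]
      have hdrop : (PySem.Set.update (seen ++ [k]) L).drop seen.length
          = k :: (PySem.Set.update (seen ++ [k]) L).drop (seen ++ [k]).length := by
        rw [PySem.Set.update_eq_append_filter (seen ++ [k]) L]
        generalize (List.filter (fun y => !(seen ++ [k]).contains y) (PySem.Set.ofList L)) = f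
        rw [List.drop_left, List.append_assoc, List.drop_left]
        rfl
      rw [hdrop, List.foldl_cons, ih (seen ++ [k]) (pvMatch s k) (pv_inv_step s seen hs k)]

-- (5) TOKENIZATION: a predicate splitter characterising both sides
def pvIsDelim (c : Char) : Bool := (" .,!?:;").toList.contains c

def pvSplitP (p : Char → Bool) : List Char → List (List Char)
  | [] => [[]]
  | c :: t => if p c then [] :: pvSplitP p t
              else match pvSplitP p t with
                   | h :: r => (c :: h) :: r
                   | [] => [[c]]

lemma pvSplitP_ne_nil (p : Char → Bool) (l : List Char) : pvSplitP p l ≠ [] := by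
  cases l with
  | nil => simp [pvSplitP]
  | cons c t =>
    rw [pvSplitP]
    split_ifs
    · simp
    · cases h : pvSplitP p t <;> simp

-- splitOn.go for sep = [' '] computes the predicate splitter
lemma pv_go_space : ∀ (fuel : Nat) (l cur : List Char) (acc : List (List Char)), l.length ≤ fuel →
    PySem.Chars.splitOn.go [' '] fuel l cur acc
      = acc.reverse ++ (match pvSplitP (· == ' ') l with
          | h :: r => (cur.reverse ++ h) :: r
          | [] => []) := by
  intro fuel
  induction fuel with
  | zero =>
    intro l cur acc h
    simp only [Nat.le_zero, List.length_eq_zero_iff] at h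
    subst h
    simp [PySem.Chars.splitOn.go, pvSplitP]
  | succ n ih =>
    intro l cur acc h
    cases l with
    | nil => simp [PySem.Chars.splitOn.go, pvSplitP]
    | cons x t =>
      have ht : t.length ≤ n := by simpa using h
      simp only [PySem.Chars.splitOn.go, List.isPrefixOf, Bool.and_true]
      by_cases hx : x = ' '
      · subst hx
        simp only [beq_self_eq_true, if_pos, List.length_cons, List.length_nil,
          List.drop_succ_cons, List.drop_zero]
        rw [ih t [] (cur.reverse :: acc) ht]
        cases hs : pvSplitP (· == ' ') t with
        | nil => exact absurd hs (pvSplitP_ne_nil _ t)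
        | cons h0 r =>
          rw [pvSplitP]
          simp [hs]
      · have hbx : (' ' == x) = false := by simp [Ne.symm hx]
        simp only [hbx, Bool.false_eq_true, if_false]
        rw [ih t (x :: cur) acc ht]
        cases hs : pvSplitP (· == ' ') t with
        | nil => exact absurd hs (pvSplitP_ne_nil _ t)
        | cons h0 r =>
          rw [pvSplitP]
          have hbx2 : (x == ' ') = false := by simp [hx]
          simp [hbx2, hs]

lemma pv_splitOn_space (s : List Char) :
    PySem.Chars.splitOn s [' '] = pvSplitP (· == ' ') s := by
  rw [PySem.Chars.splitOn, pv_go_space (s.length + 1) s [] [] (by omega)]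
  cases hs : pvSplitP (· == ' ') s with
  | nil => exact absurd hs (pvSplitP_ne_nil _ s)
  | cons h0 r => simp

-- (stringList from split? on the cleaned string)
lemma pv_split_words (s : String) :
    (PySem.Str.split? s " ").getD [] = (PySem.Chars.splitOn s.toList [' ']).map String.ofList := by
  simp [PySem.Str.split?, PySem.Chars.split?, show (" ":String).toList = [' '] from by decide]

-- splitting the punctuation-cleaned text on ' ' = splitting the raw text on the 7 delimiters
lemma pv_split_clean (l : List Char) :
    pvSplitP (· == ' ') (l.map (fun c => if ".,!?:;".toList.contains c then ' ' else c))
      = pvSplitP pvIsDelim l := by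
  induction l with
  | nil => rfl
  | cons c t ih =>
    have hdelim : pvIsDelim c = ((c == ' ') || ".,!?:;".toList.contains c) := by
      rw [pvIsDelim, show (" .,!?:;":String).toList = ' ' :: (".,!?:;":String).toList from by decide,
        List.contains_cons]
    simp only [List.map_cons]
    by_cases hc : (".,!?:;".toList.contains c) = true
    · have h1 : (if ".,!?:;".toList.contains c = true then ' ' else c) = ' ' := if_pos hc
      rw [h1]
      simp only [pvSplitP, hdelim, hc, Bool.or_true, beq_self_eq_true, if_true, ih]
    · have hc' : (".,!?:;".toList.contains c) = false := by simpa using hc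
      have h1 : (if ".,!?:;".toList.contains c = true then ' ' else c) = c := by
        rw [hc']; rfl
      rw [h1]
      simp only [pvSplitP, hdelim, hc', Bool.or_false, ih]

-- lowercasing commutes with delimiter splitting
lemma pv_isupper_toNat {c : Char} (h : PySem.Chars.isupper c = true) :
    65 ≤ c.toNat ∧ c.toNat ≤ 90 := by
  simp [PySem.Chars.isupper, Char.le_def] at h
  exact ⟨h.1, h.2⟩

lemma pv_delim_false {d : Char} (hd : 65 ≤ d.toNat) : pvIsDelim d = false := by
  simp only [pvIsDelim,
    show (" .,!?:;":String).toList = [' ', '.', ',', '!', '?', ':', ';'] from by decide,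
    List.contains_eq_mem, List.mem_cons, List.not_mem_nil, or_false,
    decide_eq_false_iff_not]
  intro hmem
  rcases hmem with h | h | h | h | h | h | h <;>
    (subst h; simp [Char.toNat] at hd)

lemma pv_lowerChar_delim (c : Char) :
    pvIsDelim (PySem.Chars.lowerChar c) = pvIsDelim c := by
  rw [PySem.Chars.lowerChar]
  by_cases h : PySem.Chars.isupper c = true
  · obtain ⟨h1, h2⟩ := pv_isupper_toNat h
    rw [if_pos h]
    have hv : (c.toNat + 32).isValidChar := Or.inl (by omega)
    have ht : (Char.ofNat (c.toNat + 32)).toNat = c.toNat + 32 := by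
      rw [Char.toNat_ofNat]; simp [hv]
    rw [pv_delim_false (d := Char.ofNat (c.toNat + 32)) (by omega),
      pv_delim_false h1]
  · rw [if_neg h]

lemma pv_split_lower (l : List Char) :
    pvSplitP pvIsDelim (PySem.Chars.lower l) = (pvSplitP pvIsDelim l).map PySem.Chars.lower := by
  induction l with
  | nil => rfl
  | cons c t ih =>
    simp only [PySem.Chars.lower, List.map_cons] at ih ⊢
    rw [pvSplitP, pvSplitP, pv_lowerChar_delim]
    by_cases hc : pvIsDelim c = true
    · simp [hc, ih, PySem.Chars.lower]
    · have hc' : pvIsDelim c = false := by simpa using hc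
      cases hs : pvSplitP pvIsDelim t with
      | nil => exact absurd hs (pvSplitP_ne_nil _ t)
      | cons h0 r =>
        rw [hs] at ih
        simp [hc', ih, PySem.Chars.lower]

-- (6) the character scan computes: tokens handled in order, then the flush
lemma pv_scan_eq : ∀ (l : List Char)
    (s : (PySem.Dict String String × PySem.Set String) × List String × Option String)
    (cur : List Char),
    pvHandle (l.foldl pvScanStep (s, cur)).1 (String.ofList (l.foldl pvScanStep (s, cur)).2)
      = (match pvSplitP pvIsDelim l with
         | h :: r => String.ofList (cur ++ h) :: r.map String.ofList
         | [] => []).foldl pvHandle s := by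
  intro l
  induction l with
  | nil =>
    intro s cur
    simp [pvSplitP]
  | cons c t ih =>
    intro s cur
    rw [List.foldl_cons, pvScanStep, pvSplitP]
    by_cases hc : pvIsDelim c = true
    · rw [if_pos (by rw [← pvIsDelim]; exact hc), ih (pvHandle s (String.ofList cur)) []]
      cases hs : pvSplitP pvIsDelim t with
      | nil => exact absurd hs (pvSplitP_ne_nil _ t)
      | cons h0 r => simp [hc]
    · have hc' : pvIsDelim c = false := by simpa using hc
      rw [if_neg (by rw [← pvIsDelim]; simp [hc'])]
      rw [ih s (cur ++ [c])]
      cases hs : pvSplitP pvIsDelim t with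
      | nil => exact absurd hs (pvSplitP_ne_nil _ t)
      | cons h0 r => simp [hc']

-- (7) folding pvHandle = unigram fold plus queued bigram list
def pvBigList : Option String → List String → List String
  | _, [] => []
  | none, t :: r => pvBigList (some t) r
  | some p, t :: r => (p ++ " " ++ t) :: pvBigList (some t) r

def pvLastTok : Option String → List String → Option String
  | prev, [] => prev
  | _, t :: r => pvLastTok (some t) r

lemma pv_fold_handle : ∀ (ts : List String) (ms : PySem.Dict String String × PySem.Set String)
    (bgs : List String) (prev : Option String),
    ts.foldl pvHandle (ms, bgs, prev)
      = (ts.foldl pvMatch ms, bgs ++ pvBigList prev ts, pvLastTok prev ts) := by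
  intro ts
  induction ts with
  | nil => intro ms bgs prev; simp [pvBigList, pvLastTok]
  | cons t r ih =>
    intro ms bgs prev
    rw [List.foldl_cons, List.foldl_cons]
    cases prev with
    | none => rw [show pvHandle (ms, bgs, none) t = (pvMatch ms t, bgs, some t) from rfl,
        ih, pvBigList, pvLastTok]
    | some p =>
      rw [show pvHandle (ms, bgs, some p) t = (pvMatch ms t, bgs ++ [p ++ " " ++ t], some t) from rfl,
        ih, pvBigList, pvLastTok, List.append_assoc]
      rfl

lemma pv_biglist_some : ∀ (ws : List String) (p : String),
    pvBigList (some p) ws = ((p :: ws).zip ws).map (fun q => q.1 ++ " " ++ q.2) := by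
  intro ws
  induction ws with
  | nil => intro p; rfl
  | cons t r ih => intro p; rw [pvBigList, ih t]; rfl

lemma pv_biglist_zip (ws : List String) :
    pvBigList none ws = (ws.zip ws.tail).map (fun p => p.1 ++ " " ++ p.2) := by
  cases ws with
  | nil => rfl
  | cons t r => rw [pvBigList, pv_biglist_some r t]; rfl

-- lower(join " " [a, b]) = lower a ++ " " ++ lower b
lemma pv_lower_join (a b : String) :
    PySem.Str.lower (PySem.Str.join " " [a, b]) = PySem.Str.lower a ++ " " ++ PySem.Str.lower b := by
  apply String.toList_inj.mp
  simp only [PySem.Str.toList_lower, PySem.Str.join, String.toList_append, String.toList_ofList,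
    List.map_cons, List.map_nil]
  rw [show PySem.Chars.join (" ":String).toList [a.toList, b.toList]
        = a.toList ++ ' ' :: b.toList from by
      simp [PySem.Chars.join, List.intercalate, show (" ":String).toList = [' '] from by decide]]
  simp [PySem.Chars.lower, show PySem.Chars.lowerChar ' ' = ' ' from by decide]

lemma pv_bigrams_lower (ws : List String) :
    ((ws.zip ws.tail).map (fun p => PySem.Str.join " " [p.1, p.2])).map PySem.Str.lower
      = pvBigList none (ws.map PySem.Str.lower) := by
  rw [pv_biglist_zip, List.map_map, ← List.map_tail, List.zip_map, List.map_map]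
  apply List.map_congr_left
  intro q _
  simp only [Function.comp, Prod.map]
  exact pv_lower_join q.1 q.2

lemma pv_lower_ofList (cs : List Char) :
    PySem.Str.lower (String.ofList cs) = String.ofList (PySem.Chars.lower cs) := by
  rw [PySem.Str.lower, String.toList_ofList]

-- (8) the main equivalence
lemma pv_main (text : String) : text_parser text = text_parser_alt text := by
  -- A side: reduce to two pvMatch folds over the lowered tokens and their bigrams
  rw [text_parser, text_parser_alt, pvParseText, pv_clean_eq text, pv_split_words,
    String.toList_ofList, pv_splitOn_space, pv_split_clean, pv_ngrams_eq]
  rw [PySem.Dict.keys_foldl_insert_key _ PySem.Str.lower (fun _ _ => "") PySem.Dict.empty]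
  rw [PySem.Dict.keys_empty, pv_step_eq]
  have hded := pv_fold_dedup
    (((pvSplitP pvIsDelim text.toList).map String.ofList
        ++ (((pvSplitP pvIsDelim text.toList).map String.ofList).zip
             ((pvSplitP pvIsDelim text.toList).map String.ofList).tail).map
              (fun p => PySem.Str.join " " [p.1, p.2])).map PySem.Str.lower)
    [] (PySem.Dict.empty, PySem.Set.empty) ⟨by simp [PySem.Dict.keys_empty], by simp⟩
  simp only [List.length_nil, List.drop_zero] at hded
  rw [show ∀ (l : List String) (init : PySem.Dict String String × PySem.Set String),
        (PySem.Set.update [] l).foldl pvMatch init = (PySem.Set.ofList l).foldl pvMatch init from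
      fun l init => rfl] at *
  rw [hded]
  rw [List.map_append, List.foldl_append]
  -- the lowered word list is B's token list
  have hw : ((pvSplitP pvIsDelim text.toList).map String.ofList).map PySem.Str.lower
      = (pvSplitP pvIsDelim (PySem.Chars.lower text.toList)).map String.ofList := by
    rw [pv_split_lower, List.map_map, List.map_map]
    apply List.map_congr_left
    intro cs _
    exact pv_lower_ofList cs
  rw [pv_bigrams_lower, hw]
  -- B side: the scan produces exactly that token fold and that bigram queue
  rw [show (PySem.Str.lower text).toList = PySem.Chars.lower text.toList from
    PySem.Str.toList_lower text]
  rw [pv_scan_eq (PySem.Chars.lower text.toList)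
    ((PySem.Dict.empty, PySem.Set.empty), [], none) []]
  cases hs : pvSplitP pvIsDelim (PySem.Chars.lower text.toList) with
  | nil => exact absurd hs (pvSplitP_ne_nil _ _)
  | cons h0 r =>
    simp only [List.nil_append]
    rw [show String.ofList h0 :: r.map String.ofList = (h0 :: r).map String.ofList from rfl]
    rw [pv_fold_handle ((h0 :: r).map String.ofList) (PySem.Dict.empty, PySem.Set.empty) [] none]
    rfl

-- ===== VERDICT (by name: the statement is the Claim_ definition above) =====
theorem text_parser_spec : Claim_equal_text_parser := by
  intro text _
  exact pv_main text
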